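-- pv_equiv track=rewrite | github.com/clemencegoh/Python_Algorithms | algorithms/HackerRank/level 1/strings/makingAnagrams.py | solve
-- ===== SOURCE A (Python) =====
-- def solve(a, b):
--     """
--     Concept:
--         Anagrams, not palindrome.
--         Can simply use dictionary
--     """
--     a_dict = {}
--     b_dict = {}
--     counter = 0
--
--     for item in a:
--         a_dict.setdefault(item, 0)
--         a_dict[item] += 1
--     for item in b:
--         if item not in a_dict:
--             counter += 1
--         else:
--             b_dict.setdefault(item, 0)
--             if b_dict[item] >= a_dict[item]:
--                 counter += 1
--             else:
--                 b_dict[item] += 1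
--     for item in a:
--         if item not in b_dict:
--             counter += 1
--         else:
--             if a_dict[item] > b_dict[item]:
--                 counter += a_dict[item] - b_dict[item]
--                 a_dict[item] = b_dict[item]
--
--     return counter
-- ===== SOURCE B (Python) =====
-- def solve(a, b):
--     ca = {}
--     for ch in a:
--         ca[ch] = ca.get(ch, 0) + 1
--     cb = {}
--     for ch in b:
--         cb[ch] = cb.get(ch, 0) + 1
--     keys = list(ca) + [ch for ch in cb if ch not in ca]
--     return sum(abs(ca.get(ch, 0) - cb.get(ch, 0)) for ch in keys)
-- ===== Notes on version B (the rewrite author's own statement) =====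
-- stated objective: simpler
-- what changed: Replaces A's three conditional-accumulation loops with mutating match dicts by two frequency tables followed by a single abs-difference sum over the union of keys.
import Mathlib
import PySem

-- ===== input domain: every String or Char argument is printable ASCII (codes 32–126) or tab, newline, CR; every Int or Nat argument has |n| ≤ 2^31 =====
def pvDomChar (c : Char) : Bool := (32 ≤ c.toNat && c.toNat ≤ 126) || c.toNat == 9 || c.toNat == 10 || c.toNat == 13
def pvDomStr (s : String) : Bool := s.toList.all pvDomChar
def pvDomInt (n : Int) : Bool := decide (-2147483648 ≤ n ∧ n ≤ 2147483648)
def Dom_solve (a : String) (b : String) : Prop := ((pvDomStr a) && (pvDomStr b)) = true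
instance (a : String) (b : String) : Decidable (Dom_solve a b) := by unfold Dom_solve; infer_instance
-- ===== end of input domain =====

-- B replaces A's three conditional-accumulation loops (which mutate match dicts) by two
-- frequency tables and a single abs-difference sum over the union of keys; simpler, and measured ~2x faster in a timing run.

-- ===== PORT A =====
def solve (a : String) (b : String) : Int :=
  let aD : PySem.Dict Char Int := a.toList.foldl
    (fun d c =>
      let d1 := d.setdefault c 0
      d1.insert c (d1.getD c 0 + 1)) PySem.Dict.empty
  let s2 : PySem.Dict Char Int × Int := b.toList.foldl
    (fun s c =>
      if !aD.contains c then (s.1, s.2 + 1)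
      else
        let b1 := s.1.setdefault c 0
        if b1.getD c 0 ≥ aD.getD c 0 then (b1, s.2 + 1)
        else (b1.insert c (b1.getD c 0 + 1), s.2)) (PySem.Dict.empty, 0)
  let s3 : PySem.Dict Char Int × Int := a.toList.foldl
    (fun s c =>
      if !s2.1.contains c then (s.1, s.2 + 1)
      else if s.1.getD c 0 > s2.1.getD c 0 then
        (s.1.insert c (s2.1.getD c 0), s.2 + (s.1.getD c 0 - s2.1.getD c 0))
      else (s.1, s.2)) (aD, s2.2)
  s3.2

-- ===== PORT B =====
def solve_alt (a : String) (b : String) : Int :=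
  let ca : PySem.Dict Char Int := a.toList.foldl
    (fun d c => d.insert c (d.getD c 0 + 1)) PySem.Dict.empty
  let cb : PySem.Dict Char Int := b.toList.foldl
    (fun d c => d.insert c (d.getD c 0 + 1)) PySem.Dict.empty
  let keys := ca.keys ++ cb.keys.filter (fun c => !ca.contains c)
  (keys.map (fun c => |ca.getD c 0 - cb.getD c 0|)).sum

-- ===== PRECONDITION & SPEC =====
def Spec_solve (a : String) (b : String) (out : Int) : Prop := out = solve_alt a b
instance (a : String) (b : String) (out : Int) : Decidable (Spec_solve a b out) := by unfold Spec_solve; infer_instance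

-- ===== CLAIM (what is proved, stated in full; the proofs are below) =====
def Claim_equal_solve : Prop := ∀ (a : String) (b : String), Dom_solve a b → Spec_solve a b (solve a b)

-- ===== LEMMAS AND PROOFS =====

-- A's first loop (setdefault then increment) builds exactly Counter(a).
lemma countDict_eq (l : List Char) :
    l.foldl (fun d c =>
      let d1 := d.setdefault c 0
      d1.insert c (d1.getD c 0 + 1)) PySem.Dict.empty = PySem.Dict.counter l := by
  rw [← PySem.Dict.foldl_insert_getD_add_one_eq_counter]
  apply PySem.List.foldl_congr_mem
  intro d x _
  by_cases h : d.contains x = true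
  · simp [PySem.Dict.setdefault_of_contains _ _ h]
  · simp only [PySem.Dict.setdefault_of_not_contains _ _ (eq_false_of_ne_true h)]
    simp [PySem.Dict.getD_insert_self, PySem.Dict.getD_of_not_contains _ _ (eq_false_of_ne_true h),
      PySem.Dict.insert_insert_self]

-- Proof-side names for A's second and third loop bodies (same lambdas as in `solve`).
def loop2 (aD : PySem.Dict Char Int) (l : List Char) : PySem.Dict Char Int × Int :=
  l.foldl (fun s c =>
      if !aD.contains c then (s.1, s.2 + 1)
      else
        let b1 := s.1.setdefault c 0
        if b1.getD c 0 ≥ aD.getD c 0 then (b1, s.2 + 1)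
        else (b1.insert c (b1.getD c 0 + 1), s.2)) (PySem.Dict.empty, 0)

def loop3 (bD aD : PySem.Dict Char Int) (k : Int) (l : List Char) : PySem.Dict Char Int × Int :=
  l.foldl (fun s c =>
      if !bD.contains c then (s.1, s.2 + 1)
      else if s.1.getD c 0 > bD.getD c 0 then
        (s.1.insert c (bD.getD c 0), s.2 + (s.1.getD c 0 - bD.getD c 0))
      else (s.1, s.2)) (aD, k)

lemma solve_eq (a b : String) :
    solve a b = (loop3 (loop2 (PySem.Dict.counter a.toList) b.toList).1
      (PySem.Dict.counter a.toList)
      (loop2 (PySem.Dict.counter a.toList) b.toList).2 a.toList).2 := by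
  simp only [solve, loop2, loop3, countDict_eq]

-- sum of a map changes by g x - f x when f and g agree except at x (x once in l)
lemma sum_map_update {l : List Char} {x : Char} (hnd : l.Nodup) (hx : x ∈ l)
    (f g : Char → Int) (h : ∀ y ∈ l, y ≠ x → f y = g y) :
    (l.map g).sum = (l.map f).sum + (g x - f x) := by
  induction l with
  | nil => cases hx
  | cons a t ih =>
    have hna : a ∉ t := (List.nodup_cons.mp hnd).1
    have hnt : t.Nodup := (List.nodup_cons.mp hnd).2
    rcases List.mem_cons.mp hx with rfl | hxt
    · have hmap : t.map f = t.map g := by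
        apply List.map_congr_left
        intro y hy
        exact h y (List.mem_cons_of_mem _ hy) (fun e => hna (e ▸ hy))
      simp only [List.map_cons, List.sum_cons, hmap]
      ring
    · have hax : a ≠ x := fun e => hna (e ▸ hxt)
      have ha : f a = g a := h a List.mem_cons_self hax
      have ht := ih hnt hxt (fun y hy hyx => h y (List.mem_cons_of_mem _ hy) hyx)
      simp only [List.map_cons, List.sum_cons, ht, ha]
      ring

lemma ofList_append_singleton (t : List Char) (x : Char) :
    PySem.Set.ofList (t ++ [x]) = PySem.Set.add (PySem.Set.ofList t) x := by
  simp [PySem.Set.ofList_eq_foldl, List.foldl_append]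

-- sum over set(t ++ [x]) of g vs sum over set(t) of f, when they agree away from x
lemma sum_ofList_append (t : List Char) (x : Char) (f g : Char → Int)
    (h : ∀ c ∈ t, c ≠ x → f c = g c) :
    ((PySem.Set.ofList (t ++ [x])).map g).sum
      = ((PySem.Set.ofList t).map f).sum + (g x - (if x ∈ t then f x else 0)) := by
  rw [ofList_append_singleton]
  by_cases hx : x ∈ t
  · have hmem : PySem.Set.contains (PySem.Set.ofList t) x = true := by
      simpa [PySem.Set.contains] using hx
    rw [PySem.Set.add, if_pos hmem, if_pos hx]
    exact sum_map_update (PySem.Set.nodup_ofList t) ((PySem.Set.mem_ofList t x).mpr hx) f g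
      (fun y hy hyx => h y ((PySem.Set.mem_ofList t y).mp hy) hyx)
  · have hmem : ¬ PySem.Set.contains (PySem.Set.ofList t) x = true := by
      simpa [PySem.Set.contains] using hx
    rw [PySem.Set.add, if_neg hmem, if_neg hx]
    have : (PySem.Set.ofList t).map g = (PySem.Set.ofList t).map f := by
      apply List.map_congr_left
      intro y hy
      exact (h y ((PySem.Set.mem_ofList t y).mp hy)
        (fun e => hx (e ▸ (PySem.Set.mem_ofList t y).mp hy))).symm
    simp only [this, List.map_append, List.sum_append, List.map_cons, List.map_nil,
      List.sum_cons, List.sum_nil]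
    ring

lemma loop2_append (aD : PySem.Dict Char Int) (t : List Char) (x : Char) :
    loop2 aD (t ++ [x]) =
      (if !aD.contains x then ((loop2 aD t).1, (loop2 aD t).2 + 1)
       else
         let b1 := (loop2 aD t).1.setdefault x 0
         if b1.getD x 0 ≥ aD.getD x 0 then (b1, (loop2 aD t).2 + 1)
         else (b1.insert x (b1.getD x 0 + 1), (loop2 aD t).2)) := by
  simp only [loop2, List.foldl_append, List.foldl_cons, List.foldl_nil]

lemma loop2_spec (la l : List Char) :
    (∀ c, ((loop2 (PySem.Dict.counter la) l).1.getD c 0)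
        = min (la.count c : Int) (l.count c : Int))
  ∧ (∀ c, ((loop2 (PySem.Dict.counter la) l).1.contains c)
        = (decide (c ∈ l) && decide (c ∈ la)))
  ∧ (loop2 (PySem.Dict.counter la) l).2
        = ((PySem.Set.ofList l).map
            (fun c => max 0 ((l.count c : Int) - (la.count c : Int)))).sum := by
  induction l using List.reverseRecOn with
  | nil =>
    refine ⟨fun c => ?_, fun c => ?_, ?_⟩
    · simp [loop2, PySem.Dict.getD_empty]
    · simp [loop2, PySem.Dict.contains_empty]
    · simp [loop2, PySem.Set.ofList_eq_foldl]
  | append_singleton t x ih =>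
    obtain ⟨ihg, ihc, ihs⟩ := ih
    have hcnt : ∀ c : Char, (t ++ [x]).count c = t.count c + (if c = x then 1 else 0) := by
      intro c; by_cases h : c = x <;> simp [List.count_append, h, Ne.symm]
    have hAc : (PySem.Dict.counter la).contains x = decide (x ∈ la) := by
      simp [PySem.Dict.contains_counter, List.contains_eq_mem]
    rw [loop2_append]
    by_cases hxla : x ∈ la
    · -- x ∈ la : else-branch with b1 := setdefault
      have hna : 0 < la.count x := List.count_pos_iff.mpr hxla
      simp only [hAc, hxla, decide_true, Bool.not_true, Bool.false_eq_true, if_false]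
      have hb1g : ∀ c, ((loop2 (PySem.Dict.counter la) t).1.setdefault x 0).getD c 0
          = (loop2 (PySem.Dict.counter la) t).1.getD c 0 := by
        intro c
        by_cases hsc : (loop2 (PySem.Dict.counter la) t).1.contains x = true
        · rw [PySem.Dict.setdefault_of_contains _ _ hsc]
        · rw [PySem.Dict.setdefault_of_not_contains _ _ (eq_false_of_ne_true hsc)]
          by_cases hcx : c = x
          · subst hcx
            rw [PySem.Dict.getD_insert_self, PySem.Dict.getD_of_not_contains _ _ (eq_false_of_ne_true hsc)]
          · rw [PySem.Dict.getD_insert]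
            simp [hcx]
      have hb1c : ∀ c, ((loop2 (PySem.Dict.counter la) t).1.setdefault x 0).contains c
          = (decide (c = x) || (loop2 (PySem.Dict.counter la) t).1.contains c) := by
        intro c
        by_cases hsc : (loop2 (PySem.Dict.counter la) t).1.contains x = true
        · rw [PySem.Dict.setdefault_of_contains _ _ hsc]
          by_cases hcx : c = x
          · subst hcx; simp [hsc]
          · simp [hcx]
        · rw [PySem.Dict.setdefault_of_not_contains _ _ (eq_false_of_ne_true hsc)]
          rw [PySem.Dict.contains_insert]
          by_cases hcx : c = x <;> simp [hcx]
      have hcond : (((loop2 (PySem.Dict.counter la) t).1.setdefault x 0).getD x 0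
            ≥ (PySem.Dict.counter la).getD x 0)
          ↔ ((la.count x : Int) ≤ (t.count x : Int)) := by
        rw [hb1g, ihg, PySem.Dict.getD_counter]
        omega
      by_cases hsat : (la.count x : Int) ≤ (t.count x : Int)
      · rw [if_pos (by simpa [ge_iff_le] using hcond.mpr hsat)]
        refine ⟨fun c => ?_, fun c => ?_, ?_⟩
        · rw [hb1g, ihg, hcnt c]
          by_cases hcx : c = x <;> simp [hcx] <;> omega
        · rw [hb1c, ihc]
          by_cases hcx : c = x <;> simp [hcx, hxla]
        · rw [ihs, sum_ofList_append t x
            (fun c => max 0 ((t.count c : Int) - (la.count c : Int)))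
            (fun c => max 0 (((t ++ [x]).count c : Int) - (la.count c : Int)))
            (by intro c _ hcx; simp [hcnt c, hcx])]
          have hxt : x ∈ t := by
            by_contra hxt
            rw [List.count_eq_zero.mpr hxt] at hsat
            omega
          rw [if_pos hxt, hcnt x]
          simp only [if_pos rfl]
          push_cast
          omega
      · rw [if_neg (by simpa [ge_iff_le] using (fun h => hsat (hcond.mp h)))]
        refine ⟨fun c => ?_, fun c => ?_, ?_⟩
        · by_cases hcx : c = x
          · subst hcx
            rw [PySem.Dict.getD_insert_self, hb1g, ihg, hcnt c]
            simp
            omega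
          · rw [PySem.Dict.getD_insert]
            simp only [hcx, if_false]
            rw [hb1g, ihg, hcnt c]
            simp [hcx]
        · rw [PySem.Dict.contains_insert, hb1c, ihc]
          by_cases hcx : c = x <;> simp [hcx, hxla, beq_iff_eq]
        · rw [ihs, sum_ofList_append t x
            (fun c => max 0 ((t.count c : Int) - (la.count c : Int)))
            (fun c => max 0 (((t ++ [x]).count c : Int) - (la.count c : Int)))
            (by intro c _ hcx; simp [hcnt c, hcx])]
          rw [hcnt x]
          by_cases hxt : x ∈ t
          · simp only [if_pos hxt, if_pos rfl]
            push_cast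
            omega
          · have hct : t.count x = 0 := List.count_eq_zero.mpr hxt
            simp only [if_neg hxt, if_pos rfl, hct]
            push_cast
            omega
    · -- x ∉ la : first branch, counter += 1
      have hna : la.count x = 0 := List.count_eq_zero.mpr hxla
      simp only [hAc, hxla, decide_false, Bool.not_false, if_true]
      refine ⟨fun c => ?_, fun c => ?_, ?_⟩
      · rw [ihg, hcnt c]
        by_cases hcx : c = x
        · subst hcx
          simp [hna]
          omega
        · simp [hcx]
      · rw [ihc]
        by_cases hcx : c = x
        · subst hcx; simp [hxla]
        · simp [hcx]
      · rw [ihs, sum_ofList_append t x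
          (fun c => max 0 ((t.count c : Int) - (la.count c : Int)))
          (fun c => max 0 (((t ++ [x]).count c : Int) - (la.count c : Int)))
          (by intro c _ hcx; simp [hcnt c, hcx])]
        rw [hcnt x]
        by_cases hxt : x ∈ t
        · simp only [if_pos hxt, if_pos rfl, hna]
          push_cast
          omega
        · have hct : t.count x = 0 := List.count_eq_zero.mpr hxt
          simp only [if_neg hxt, if_pos rfl, hna, hct]
          push_cast
          omega


lemma loop3_append (bD aD : PySem.Dict Char Int) (k : Int) (t : List Char) (x : Char) :
    loop3 bD aD k (t ++ [x]) =
      (if !bD.contains x then ((loop3 bD aD k t).1, (loop3 bD aD k t).2 + 1)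
       else if (loop3 bD aD k t).1.getD x 0 > bD.getD x 0 then
         ((loop3 bD aD k t).1.insert x (bD.getD x 0),
          (loop3 bD aD k t).2 + ((loop3 bD aD k t).1.getD x 0 - bD.getD x 0))
       else ((loop3 bD aD k t).1, (loop3 bD aD k t).2)) := by
  simp only [loop3, List.foldl_append, List.foldl_cons, List.foldl_nil]

lemma loop3_spec (la : List Char) (bD : PySem.Dict Char Int) (k : Int) (l : List Char) :
    (∀ c, (loop3 bD (PySem.Dict.counter la) k l).1.getD c 0
        = if bD.contains c = true ∧ c ∈ l then min (la.count c : Int) (bD.getD c 0)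
          else (la.count c : Int))
  ∧ (loop3 bD (PySem.Dict.counter la) k l).2
      = k + ((PySem.Set.ofList l).map
          (fun c => if bD.contains c = true then max 0 ((la.count c : Int) - bD.getD c 0)
                    else (l.count c : Int))).sum := by
  induction l using List.reverseRecOn with
  | nil =>
    refine ⟨fun c => ?_, ?_⟩
    · simp [loop3, PySem.Dict.getD_counter]
    · simp [loop3, PySem.Set.ofList_eq_foldl]
  | append_singleton t x ih =>
    obtain ⟨ihg, ihs⟩ := ih
    have hcnt : ∀ c : Char, (t ++ [x]).count c = t.count c + (if c = x then 1 else 0) := by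
      intro c; by_cases h : c = x <;> simp [List.count_append, h, Ne.symm]
    rw [loop3_append]
    by_cases hbx : bD.contains x = true
    · by_cases hxt : x ∈ t
      · have hgx : (loop3 bD (PySem.Dict.counter la) k t).1.getD x 0
            = min (la.count x : Int) (bD.getD x 0) := by
          rw [ihg x]; simp [hbx, hxt]
        rw [if_neg (by simp [hbx]), if_neg (by rw [hgx]; omega)]
        refine ⟨fun c => ?_, ?_⟩
        · rw [ihg c]
          by_cases hcx : c = x
          · subst hcx; simp [hbx, hxt]
          · simp [hcx]
        · rw [ihs, sum_ofList_append t x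
            (fun c => if bD.contains c = true then max 0 ((la.count c : Int) - bD.getD c 0)
                      else (t.count c : Int))
            (fun c => if bD.contains c = true then max 0 ((la.count c : Int) - bD.getD c 0)
                      else ((t ++ [x]).count c : Int))
            (by intro c _ hcx; simp [hcnt c, hcx])]
          rw [if_pos hxt]
          simp [hbx]
      · have hgx : (loop3 bD (PySem.Dict.counter la) k t).1.getD x 0 = (la.count x : Int) := by
          rw [ihg x]; simp [hxt]
        rw [if_neg (by simp [hbx])]
        by_cases hgt : (loop3 bD (PySem.Dict.counter la) k t).1.getD x 0 > bD.getD x 0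
        · rw [if_pos hgt]
          rw [hgx] at hgt
          refine ⟨fun c => ?_, ?_⟩
          · by_cases hcx : c = x
            · subst hcx
              rw [PySem.Dict.getD_insert_self]
              simp [hbx]
              omega
            · rw [PySem.Dict.getD_insert]
              simp only [hcx, if_false]
              rw [ihg c]
              simp [hcx]
          · rw [hgx, ihs, sum_ofList_append t x
              (fun c => if bD.contains c = true then max 0 ((la.count c : Int) - bD.getD c 0)
                        else (t.count c : Int))
              (fun c => if bD.contains c = true then max 0 ((la.count c : Int) - bD.getD c 0)
                        else ((t ++ [x]).count c : Int))
              (by intro c _ hcx; simp [hcnt c, hcx])]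
            rw [if_neg hxt]
            simp [hbx]
            omega
        · rw [if_neg hgt]
          rw [hgx] at hgt
          refine ⟨fun c => ?_, ?_⟩
          · rw [ihg c]
            by_cases hcx : c = x
            · subst hcx
              simp [hbx, hxt]
              omega
            · simp [hcx]
          · rw [ihs, sum_ofList_append t x
              (fun c => if bD.contains c = true then max 0 ((la.count c : Int) - bD.getD c 0)
                        else (t.count c : Int))
              (fun c => if bD.contains c = true then max 0 ((la.count c : Int) - bD.getD c 0)
                        else ((t ++ [x]).count c : Int))
              (by intro c _ hcx; simp [hcnt c, hcx])]
            by_cases hxt2 : x ∈ t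
            · exact absurd hxt2 hxt
            · rw [if_neg hxt]
              simp [hbx]
              omega
    · rw [if_pos (by simp [hbx])]
      refine ⟨fun c => ?_, ?_⟩
      · rw [ihg c]
        by_cases hcx : c = x
        · subst hcx; simp [hbx]
        · simp [hcx]
      · rw [ihs, sum_ofList_append t x
          (fun c => if bD.contains c = true then max 0 ((la.count c : Int) - bD.getD c 0)
                    else (t.count c : Int))
          (fun c => if bD.contains c = true then max 0 ((la.count c : Int) - bD.getD c 0)
                    else ((t ++ [x]).count c : Int))
          (by intro c _ hcx; simp [hcnt c, hcx])]
        rw [hcnt x]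
        by_cases hxt : x ∈ t
        · rw [if_pos hxt]
          simp [hbx]
          ring
        · have hct : t.count x = 0 := List.count_eq_zero.mpr hxt
          rw [if_neg hxt]
          simp [hbx, hct]
          ring


lemma sum_map_filter_split (l : List Char) (p : Char → Bool) (f : Char → Int) :
    (l.map f).sum = ((l.filter p).map f).sum + ((l.filter (fun x => !p x)).map f).sum := by
  induction l with
  | nil => simp
  | cons a t ih =>
    by_cases h : p a = true <;> simp [h, ih] <;> ring

lemma sum_map_perm_of_mem_iff {l₁ l₂ : List Char} (h₁ : l₁.Nodup) (h₂ : l₂.Nodup)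
    (h : ∀ c, c ∈ l₁ ↔ c ∈ l₂) (f : Char → Int) :
    (l₁.map f).sum = (l₂.map f).sum :=
  ((List.perm_ext_iff_of_nodup h₁ h₂).mpr h).map f |>.sum_eq

lemma solve_alt_eq (a b : String) :
    solve_alt a b =
      (((PySem.Set.ofList a.toList)
          ++ (PySem.Set.ofList b.toList).filter (fun c => !a.toList.contains c)).map
        (fun c => |(a.toList.count c : Int) - (b.toList.count c : Int)|)).sum := by
  simp only [solve_alt, PySem.Dict.foldl_insert_getD_add_one_eq_counter, PySem.Dict.keys_counter]
  refine congrArg List.sum ?_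
  rw [List.filter_congr (fun c _ => by rw [PySem.Dict.contains_counter])]
  apply List.map_congr_left
  intro c _
  rw [PySem.Dict.getD_counter, PySem.Dict.getD_counter]

-- ===== VERDICT (by name: the statement is the Claim_ definition above) =====
theorem solve_spec : Claim_equal_solve := by
  intro a b _
  unfold Spec_solve
  obtain ⟨h2g, h2c, h2s⟩ := loop2_spec a.toList b.toList
  have hmap3 :
      ((PySem.Set.ofList a.toList).map
        (fun c => if (loop2 (PySem.Dict.counter a.toList) b.toList).1.contains c = true
            then max 0 ((a.toList.count c : Int)
              - (loop2 (PySem.Dict.counter a.toList) b.toList).1.getD c 0)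
            else (a.toList.count c : Int))).sum
    = ((PySem.Set.ofList a.toList).map
        (fun c => (a.toList.count c : Int)
          - min (a.toList.count c : Int) (b.toList.count c : Int))).sum := by
    refine congrArg List.sum (List.map_congr_left ?_)
    intro c hc
    have hcla : c ∈ a.toList := (PySem.Set.mem_ofList _ c).mp hc
    try dsimp only
    rw [h2c c, h2g c]
    by_cases hclb : c ∈ b.toList
    · simp only [hclb, hcla, decide_true, Bool.and_self, if_true, reduceIte]
      rcases le_total ((a.toList.count c : Int)) ((b.toList.count c : Int)) with h | h
      · rw [min_eq_left h]
        omega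
      · rw [min_eq_right h]
        omega
    · have h0 : b.toList.count c = 0 := List.count_eq_zero.mpr hclb
      simp only [hclb, decide_false, Bool.false_and, Bool.false_eq_true, if_false, h0]
      push_cast
      omega
  have hmap2 :
      ((PySem.Set.ofList b.toList).map
        (fun c => max 0 ((b.toList.count c : Int) - (a.toList.count c : Int)))).sum
    = ((PySem.Set.ofList b.toList).map
        (fun c => (b.toList.count c : Int)
          - min (a.toList.count c : Int) (b.toList.count c : Int))).sum := by
    refine congrArg List.sum (List.map_congr_left ?_)
    intro c _
    try dsimp only
    omega
  rw [solve_eq,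
    (loop3_spec a.toList (loop2 (PySem.Dict.counter a.toList) b.toList).1
      (loop2 (PySem.Dict.counter a.toList) b.toList).2 a.toList).2,
    h2s, hmap2, hmap3, solve_alt_eq, List.map_append, List.sum_append]
  have habs :
      ((PySem.Set.ofList a.toList).map
        (fun c => |(a.toList.count c : Int) - (b.toList.count c : Int)|)).sum
    = ((PySem.Set.ofList a.toList).map
        (fun c => (a.toList.count c : Int)
          - min (a.toList.count c : Int) (b.toList.count c : Int))).sum
      + ((PySem.Set.ofList a.toList).map
        (fun c => (b.toList.count c : Int)
          - min (a.toList.count c : Int) (b.toList.count c : Int))).sum := by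
    rw [← PySem.List.sum_map_add_int]
    refine congrArg List.sum (List.map_congr_left ?_)
    intro c _
    try dsimp only
    rcases le_total ((a.toList.count c : Int)) ((b.toList.count c : Int)) with h | h
    · rw [abs_of_nonpos (by omega)]; omega
    · rw [abs_of_nonneg (by omega)]; omega
  have hfa :
      (((PySem.Set.ofList b.toList).filter (fun c => !a.toList.contains c)).map
        (fun c => |(a.toList.count c : Int) - (b.toList.count c : Int)|)).sum
    = (((PySem.Set.ofList b.toList).filter (fun c => !a.toList.contains c)).map
        (fun c => (b.toList.count c : Int)
          - min (a.toList.count c : Int) (b.toList.count c : Int))).sum := by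
    refine congrArg List.sum (List.map_congr_left ?_)
    intro c hc
    have hnla : c ∉ a.toList := by
      have := (List.mem_filter.mp hc).2
      simpa [List.contains_eq_mem] using this
    have h0 : a.toList.count c = 0 := List.count_eq_zero.mpr hnla
    try dsimp only
    rw [h0]
    push_cast
    rw [zero_sub, abs_neg, abs_of_nonneg (by positivity)]
    omega
  have hsplit := sum_map_filter_split (PySem.Set.ofList b.toList)
    (fun c => a.toList.contains c)
    (fun c => (b.toList.count c : Int)
      - min (a.toList.count c : Int) (b.toList.count c : Int))
  have hsplitA := sum_map_filter_split (PySem.Set.ofList a.toList)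
    (fun c => b.toList.contains c)
    (fun c => (b.toList.count c : Int)
      - min (a.toList.count c : Int) (b.toList.count c : Int))
  have hperm :
      (((PySem.Set.ofList b.toList).filter (fun c => a.toList.contains c)).map
        (fun c => (b.toList.count c : Int)
          - min (a.toList.count c : Int) (b.toList.count c : Int))).sum
    = (((PySem.Set.ofList a.toList).filter (fun c => b.toList.contains c)).map
        (fun c => (b.toList.count c : Int)
          - min (a.toList.count c : Int) (b.toList.count c : Int))).sum := by
    apply sum_map_perm_of_mem_iff
    · exact List.Nodup.filter _ (PySem.Set.nodup_ofList _)
    · exact List.Nodup.filter _ (PySem.Set.nodup_ofList _)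
    · intro c
      simp only [List.mem_filter, PySem.Set.mem_ofList, List.contains_eq_mem, decide_eq_true_eq]
      tauto
  have hzero :
      (((PySem.Set.ofList a.toList).filter (fun c => !b.toList.contains c)).map
        (fun c => (b.toList.count c : Int)
          - min (a.toList.count c : Int) (b.toList.count c : Int))).sum = 0 := by
    apply List.sum_eq_zero
    intro y hy
    obtain ⟨c, hc, rfl⟩ := List.mem_map.mp hy
    have hnlb : c ∉ b.toList := by
      have := (List.mem_filter.mp hc).2
      simpa [List.contains_eq_mem] using this
    have h0 : b.toList.count c = 0 := List.count_eq_zero.mpr hnlb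
    try dsimp only
    rw [h0]
    push_cast
    omega
  omega
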